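-- pv_equiv track=rewrite | github.com/Oceanjackson1/Telegram-Group-Listener | utils/validators.py | find_matched_keywords
-- ===== SOURCE A (Python) =====
-- def find_matched_keywords(content: str, keywords: list[str]) -> list[str]:
--     if not content:
--         return []
--
--     content_lower = content.lower()
--     matched: list[str] = []
--     seen: set[str] = set()
--
--     for keyword in keywords:
--         clean_keyword = keyword.strip()
--         if not clean_keyword:
--             continue
--         lookup = clean_keyword.lower()
--         if lookup in seen:
--             continue
--         if lookup in content_lower:
--             matched.append(clean_keyword)
--             seen.add(lookup)
--
--     return matched
-- ===== SOURCE B (Python) =====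
-- def find_matched_keywords(content: str, keywords: list[str]) -> list[str]:
--     content_lower = content.lower()
--     n = len(content_lower)
--
--     # Pass 1: clean and dedupe keywords, keeping first-occurrence order.
--     order: list[tuple[str, str]] = []
--     seen: set[str] = set()
--     for keyword in keywords:
--         clean = keyword.strip()
--         if clean:
--             low = clean.lower()
--             if low not in seen:
--                 seen.add(low)
--                 order.append((low, clean))
--
--     # Pass 2: index the content — the set of ALL its substrings whose length
--     # is the length of some candidate keyword.
--     lengths = {len(low) for low, _ in order if len(low) <= n}
--     subs: set[str] = set()
--     for L in lengths:
--         for i in range(n - L + 1):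
--             subs.add(content_lower[i:i + L])
--
--     # Pass 3: each keyword is now an O(1) set lookup instead of a content scan.
--     return [clean for low, clean in order if low in subs]
-- ===== Notes on version B (the rewrite author's own statement) =====
-- stated objective: faster
-- what changed: Instead of A's fused loop that substring-scans the content once per keyword while interleaving dedup and output, B dedupes keywords in a first pass, then builds a hash-set INDEX of all content substrings whose lengths match some candidate keyword, so the per-keyword content scan disappears and each keyword becomes a single set lookup.
import Mathlib
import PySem

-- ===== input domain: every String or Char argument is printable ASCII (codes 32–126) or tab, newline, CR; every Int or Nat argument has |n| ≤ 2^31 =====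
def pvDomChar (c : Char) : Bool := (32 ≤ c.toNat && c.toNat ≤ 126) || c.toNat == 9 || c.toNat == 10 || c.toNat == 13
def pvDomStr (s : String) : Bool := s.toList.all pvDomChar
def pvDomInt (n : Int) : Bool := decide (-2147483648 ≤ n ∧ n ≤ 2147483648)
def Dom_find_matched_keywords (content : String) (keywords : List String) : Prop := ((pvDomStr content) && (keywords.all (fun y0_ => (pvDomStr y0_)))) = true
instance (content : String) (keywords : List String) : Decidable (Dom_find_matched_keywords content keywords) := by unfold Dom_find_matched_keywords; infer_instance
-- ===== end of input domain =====

-- B replaces A's per-keyword substring scan of the content by a substring index: it first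
-- dedupes the cleaned keywords, then builds the set of all content substrings of the candidate
-- lengths, and finally answers each keyword by one set-membership lookup (objective: faster; measured).

-- ===== PORT A =====
def find_matched_keywords (content : String) (keywords : List String) : List String :=
  if PySem.Str.len content = 0 then []
  else
    let content_lower := PySem.Str.lower content
    (keywords.foldl (fun (st : List String × PySem.Set String) keyword =>
        let clean_keyword := PySem.Str.strip keyword
        if PySem.Str.len clean_keyword = 0 then st
        else
          let lookup := PySem.Str.lower clean_keyword
          if PySem.Set.contains st.2 lookup then st
          else if PySem.Str.isIn lookup content_lower then
            (st.1 ++ [clean_keyword], PySem.Set.add st.2 lookup)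
          else st)
      ([], PySem.Set.empty)).1

-- ===== PORT B =====
def find_matched_keywords_alt (content : String) (keywords : List String) : List String :=
  let content_lower := PySem.Str.lower content
  let n := PySem.Str.len content_lower
  -- pass 1: clean and dedupe, keeping first-occurrence order
  let order := (keywords.foldl (fun (st : List (String × String) × PySem.Set String) keyword =>
      let clean := PySem.Str.strip keyword
      if PySem.Str.len clean = 0 then st
      else
        let low := PySem.Str.lower clean
        if PySem.Set.contains st.2 low then st
        else (st.1 ++ [(low, clean)], PySem.Set.add st.2 low))
    ([], PySem.Set.empty)).1
  -- pass 2: index the content — all its substrings of the candidate lengths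
  let lengths : PySem.Set Int := (order.filter (fun p => PySem.Str.len p.1 ≤ n)).foldl
      (fun s p => PySem.Set.add s (PySem.Str.len p.1)) PySem.Set.empty
  let subs : PySem.Set String := lengths.foldl (fun s L =>
      (PySem.List.pyRange 0 (n - L + 1) 1).foldl
        (fun s i => PySem.Set.add s (PySem.Str.slice content_lower (some i) (some (i + L)))) s)
    PySem.Set.empty
  -- pass 3: each keyword is one set lookup
  (order.filter (fun p => PySem.Set.contains subs p.1)).map (fun p => p.2)

-- ===== PRECONDITION & SPEC =====
def Spec_find_matched_keywords (content : String) (keywords : List String) (out : List String) : Prop := out = find_matched_keywords_alt content keywords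
instance (content : String) (keywords : List String) (out : List String) : Decidable (Spec_find_matched_keywords content keywords out) := by unfold Spec_find_matched_keywords; infer_instance

-- ===== CLAIM (what is proved, stated in full; the proofs are below) =====
def Claim_equal_find_matched_keywords : Prop := ∀ (content : String) (keywords : List String), Dom_find_matched_keywords content keywords → Spec_find_matched_keywords content keywords (find_matched_keywords content keywords)

-- ===== LEMMAS AND PROOFS =====

-- A's loop step and B's pass-1 step, named for the proofs.
def pvStepA (cl : String) (st : List String × PySem.Set String) (keyword : String) :
    List String × PySem.Set String :=
  if PySem.Str.len (PySem.Str.strip keyword) = 0 then st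
  else if PySem.Set.contains st.2 (PySem.Str.lower (PySem.Str.strip keyword)) then st
  else if PySem.Str.isIn (PySem.Str.lower (PySem.Str.strip keyword)) cl then
    (st.1 ++ [PySem.Str.strip keyword],
      PySem.Set.add st.2 (PySem.Str.lower (PySem.Str.strip keyword)))
  else st

def pvStepB (st : List (String × String) × PySem.Set String) (keyword : String) :
    List (String × String) × PySem.Set String :=
  if PySem.Str.len (PySem.Str.strip keyword) = 0 then st
  else if PySem.Set.contains st.2 (PySem.Str.lower (PySem.Str.strip keyword)) then st
  else (st.1 ++ [(PySem.Str.lower (PySem.Str.strip keyword), PySem.Str.strip keyword)],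
    PySem.Set.add st.2 (PySem.Str.lower (PySem.Str.strip keyword)))

theorem pv_contains_add {α : Type} [BEq α] [LawfulBEq α] (s : PySem.Set α) (x y : α) :
    PySem.Set.contains (PySem.Set.add s x) y = (PySem.Set.contains s y || y == x) := by
  rw [Bool.eq_iff_iff]
  simp [PySem.Set.contains, PySem.Set.mem_add s x y]

theorem pv_contains_foldl_add {α β : Type} [BEq α] [LawfulBEq α] (f : β → α) (xs : List β)
    (s0 : PySem.Set α) (w : α) :
    PySem.Set.contains (xs.foldl (fun s x => PySem.Set.add s (f x)) s0) w
      = (PySem.Set.contains s0 w || xs.any (fun x => w == f x)) := by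
  induction xs generalizing s0 with
  | nil => simp
  | cons x xs ih =>
    rw [List.foldl_cons, ih, pv_contains_add, List.any_cons, Bool.or_assoc]

theorem pv_contains_foldl2 {α β γ : Type} [BEq α] [LawfulBEq α]
    (g : β → List γ) (f : β → γ → α) (Ls : List β) (s0 : PySem.Set α) (w : α) :
    PySem.Set.contains
      (Ls.foldl (fun s L => (g L).foldl (fun s i => PySem.Set.add s (f L i)) s) s0) w
      = (PySem.Set.contains s0 w || Ls.any (fun L => (g L).any (fun i => w == f L i))) := by
  induction Ls generalizing s0 with
  | nil => simp
  | cons L Ls ih =>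
    rw [List.foldl_cons, ih, pv_contains_foldl_add, List.any_cons, Bool.or_assoc]

-- a clamped slice with nonnegative bounds is an infix of the string
theorem pv_slice_infix (cl : String) (i L : Int) (hi : 0 ≤ i) (hL : 0 ≤ L) :
    (PySem.Str.slice cl (some i) (some (i + L))).toList <:+: cl.toList := by
  rw [PySem.Str.toList_slice, PySem.Chars.slice_eq_listSlice,
    PySem.List.slice_toNat cl.toList hi (by omega)]
  exact ((List.take_prefix _ _).isInfix).trans ((List.drop_suffix _ _).isInfix)

-- the substring index of B contains w exactly when w occurs in the content,
-- for every w that is the low of some entry of `order`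
theorem pv_subs_iff (cl : String) (order : List (String × String)) (w : String)
    (hw : ∃ q ∈ order, q.1 = w) :
    PySem.Set.contains
      (((order.filter (fun p => PySem.Str.len p.1 ≤ PySem.Str.len cl)).foldl
          (fun s p => PySem.Set.add s (PySem.Str.len p.1)) PySem.Set.empty).foldl
        (fun s L => (PySem.List.pyRange 0 (PySem.Str.len cl - L + 1) 1).foldl
          (fun s i => PySem.Set.add s (PySem.Str.slice cl (some i) (some (i + L)))) s)
        PySem.Set.empty) w
      = PySem.Str.isIn w cl := by
  rw [pv_contains_foldl2, Bool.eq_iff_iff]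
  simp only [show PySem.Set.contains (PySem.Set.empty (α := String)) w = false from rfl,
    Bool.false_or, List.any_eq_true]
  constructor
  · rintro ⟨L, hLmem, i, hi, hwi⟩
    -- L is the length of some entry, hence nonnegative
    have hLc : PySem.Set.contains
        ((order.filter (fun p => PySem.Str.len p.1 ≤ PySem.Str.len cl)).foldl
          (fun s p => PySem.Set.add s (PySem.Str.len p.1)) PySem.Set.empty) L = true := by
      simpa [PySem.Set.contains] using hLmem
    rw [pv_contains_foldl_add] at hLc
    simp only [show PySem.Set.contains (PySem.Set.empty (α := Int)) L = false from rfl,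
      Bool.false_or, List.any_eq_true] at hLc
    obtain ⟨q, -, hq⟩ := hLc
    have hL0 : 0 ≤ L := by
      have := eq_of_beq hq
      rw [this, PySem.Str.len_eq]
      positivity
    obtain ⟨hi0, -⟩ := PySem.List.mem_pyRange_one.mp hi
    rw [PySem.Str.isIn_iff_infix, eq_of_beq hwi]
    exact pv_slice_infix cl i L hi0 hL0
  · intro hin
    obtain ⟨pre, suf, hsplit⟩ := (PySem.Str.isIn_iff_infix w cl).mp hin
    obtain ⟨q, hqmem, hq⟩ := hw
    have hlen : pre.length + w.toList.length + suf.length = cl.toList.length := by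
      rw [← hsplit, List.length_append, List.length_append]
    refine ⟨(w.toList.length : Int), ?_, ?_⟩
    · -- w's length is in the lengths set
      have : PySem.Set.contains
          ((order.filter (fun p => PySem.Str.len p.1 ≤ PySem.Str.len cl)).foldl
            (fun s p => PySem.Set.add s (PySem.Str.len p.1)) PySem.Set.empty)
          (w.toList.length : Int) = true := by
        rw [pv_contains_foldl_add]
        simp only [show PySem.Set.contains (PySem.Set.empty (α := Int))
          (w.toList.length : Int) = false from rfl, Bool.false_or, List.any_eq_true]
        refine ⟨q, List.mem_filter.mpr ⟨hqmem, ?_⟩, ?_⟩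
        · rw [hq, PySem.Str.len_eq, PySem.Str.len_eq]
          exact decide_eq_true (by omega)
        · rw [hq, PySem.Str.len_eq]
          exact beq_self_eq_true _
      simpa [PySem.Set.contains] using this
    · refine ⟨(pre.length : Int), PySem.List.mem_pyRange_one.mpr
        ⟨by positivity, by rw [PySem.Str.len_eq]; omega⟩, ?_⟩
      have hslice : PySem.Str.slice cl (some (pre.length : Int))
          (some ((pre.length : Int) + (w.toList.length : Int))) = w := by
        rw [← String.toList_inj, PySem.Str.toList_slice, PySem.Chars.slice_eq_listSlice,
          PySem.List.slice_toNat cl.toList (by positivity) (by positivity)]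
        have h1 : ((pre.length : Int) + (w.toList.length : Int)).toNat
            = pre.length + w.toList.length := by omega
        have h2 : ((pre.length : Int)).toNat = pre.length := by omega
        rw [h1, h2]
        have : cl.toList = pre ++ (w.toList ++ suf) := by
          rw [← hsplit, List.append_assoc]
        rw [this, List.drop_left, Nat.add_sub_cancel_left, List.take_left]
      rw [hslice]
      exact beq_self_eq_true w

  
-- pass-1 invariant: A's matched list is B's order list filtered by occurrence, provided the
-- seen sets are linked (A's seen = B's seen restricted to the lows occurring in the content).
theorem pv_loop_inv (cl : String) (ks : List String) (m : List String) (sA : PySem.Set String)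
    (o : List (String × String)) (sB : PySem.Set String)
    (h1 : m = (o.filter (fun p => PySem.Str.isIn p.1 cl)).map (fun p => p.2))
    (h2 : ∀ k, PySem.Set.contains sA k = (PySem.Set.contains sB k && PySem.Str.isIn k cl)) :
    (ks.foldl (pvStepA cl) (m, sA)).1
      = ((ks.foldl pvStepB (o, sB)).1.filter (fun p => PySem.Str.isIn p.1 cl)).map
          (fun p => p.2) := by
  induction ks generalizing m sA o sB with
  | nil => simpa using h1
  | cons kw ks ih =>
    simp only [List.foldl_cons]
    by_cases hz : PySem.Str.len (PySem.Str.strip kw) = 0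
    · rw [show pvStepA cl (m, sA) kw = (m, sA) by unfold pvStepA; rw [if_pos hz],
        show pvStepB (o, sB) kw = (o, sB) by unfold pvStepB; rw [if_pos hz]]
      exact ih m sA o sB h1 h2
    · by_cases hB : PySem.Set.contains sB (PySem.Str.lower (PySem.Str.strip kw)) = true
      · rw [show pvStepB (o, sB) kw = (o, sB) by unfold pvStepB; rw [if_neg hz, if_pos hB]]
        have hA : pvStepA cl (m, sA) kw = (m, sA) := by
          unfold pvStepA
          rw [if_neg hz]
          by_cases hin : PySem.Str.isIn (PySem.Str.lower (PySem.Str.strip kw)) cl = true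
          · rw [if_pos (by rw [h2, hB, hin]; rfl)]
          · rw [if_neg (by rw [h2, hB, Bool.true_and]; exact hin), if_neg hin]
        rw [hA]
        exact ih m sA o sB h1 h2
      · have hB' : PySem.Set.contains sB (PySem.Str.lower (PySem.Str.strip kw)) = false :=
          Bool.eq_false_iff.mpr hB
        have hsA : PySem.Set.contains sA (PySem.Str.lower (PySem.Str.strip kw)) = false := by
          rw [h2, hB', Bool.false_and]
        rw [show pvStepB (o, sB) kw
            = (o ++ [(PySem.Str.lower (PySem.Str.strip kw), PySem.Str.strip kw)],
                PySem.Set.add sB (PySem.Str.lower (PySem.Str.strip kw))) by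
          unfold pvStepB; rw [if_neg hz, if_neg (by rw [hB']; exact Bool.false_ne_true)]]
        by_cases hin : PySem.Str.isIn (PySem.Str.lower (PySem.Str.strip kw)) cl = true
        · rw [show pvStepA cl (m, sA) kw
              = (m ++ [PySem.Str.strip kw],
                  PySem.Set.add sA (PySem.Str.lower (PySem.Str.strip kw))) by
            unfold pvStepA
            rw [if_neg hz, if_neg (by rw [hsA]; exact Bool.false_ne_true), if_pos hin]]
          refine ih _ _ _ _ ?_ ?_
          · have hinC := hin
            simp only [PySem.Str.isIn_eq, PySem.Str.toList_lower, PySem.Str.toList_strip] at hinC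
            have hfs : List.filter (fun p => PySem.Str.isIn p.1 cl)
                [(PySem.Str.lower (PySem.Str.strip kw), PySem.Str.strip kw)]
                = [(PySem.Str.lower (PySem.Str.strip kw), PySem.Str.strip kw)] := by
              simp [hinC]
            rw [List.filter_append, hfs, List.map_append, ← h1]
            rfl
          · intro k
            rw [pv_contains_add, pv_contains_add, h2 k]
            by_cases hk : k = PySem.Str.lower (PySem.Str.strip kw)
            · subst hk; rw [hin]; simp
            · simp [beq_eq_false_iff_ne.mpr hk]
        · have hin' : PySem.Str.isIn (PySem.Str.lower (PySem.Str.strip kw)) cl = false :=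
            Bool.eq_false_iff.mpr hin
          rw [show pvStepA cl (m, sA) kw = (m, sA) by
            unfold pvStepA
            rw [if_neg hz, if_neg (by rw [hsA]; exact Bool.false_ne_true),
              if_neg (by rw [hin']; exact Bool.false_ne_true)]]
          refine ih _ _ _ _ ?_ ?_
          · have hinC := hin'
            simp only [PySem.Str.isIn_eq, PySem.Str.toList_lower, PySem.Str.toList_strip] at hinC
            have hfs : List.filter (fun p => PySem.Str.isIn p.1 cl)
                [(PySem.Str.lower (PySem.Str.strip kw), PySem.Str.strip kw)] = [] := by
              simp [hinC]
            rw [List.filter_append, hfs, List.append_nil, ← h1]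
          · intro k
            rw [pv_contains_add, h2 k]
            by_cases hk : k = PySem.Str.lower (PySem.Str.strip kw)
            · subst hk; rw [hin']; simp
            · simp [beq_eq_false_iff_ne.mpr hk]

-- every low collected by pass 1 is a nonempty string
theorem pv_lows_nonempty (ks : List String) (o : List (String × String)) (sB : PySem.Set String)
    (h : ∀ p ∈ o, p.1.toList ≠ []) :
    ∀ p ∈ (ks.foldl pvStepB (o, sB)).1, p.1.toList ≠ [] := by
  induction ks generalizing o sB with
  | nil => exact h
  | cons kw ks ih =>
    simp only [List.foldl_cons]
    by_cases hz : PySem.Str.len (PySem.Str.strip kw) = 0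
    · rw [show pvStepB (o, sB) kw = (o, sB) by unfold pvStepB; rw [if_pos hz]]
      exact ih o sB h
    · by_cases hB : PySem.Set.contains sB (PySem.Str.lower (PySem.Str.strip kw)) = true
      · rw [show pvStepB (o, sB) kw = (o, sB) by unfold pvStepB; rw [if_neg hz, if_pos hB]]
        exact ih o sB h
      · rw [show pvStepB (o, sB) kw
            = (o ++ [(PySem.Str.lower (PySem.Str.strip kw), PySem.Str.strip kw)],
                PySem.Set.add sB (PySem.Str.lower (PySem.Str.strip kw))) by
          unfold pvStepB; rw [if_neg hz, if_neg hB]]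
        refine ih _ _ ?_
        intro p hp
        rcases List.mem_append.mp hp with hp | hp
        · exact h p hp
        · simp only [List.mem_singleton] at hp
          subst hp
          simp only [PySem.Str.toList_lower, PySem.Chars.lower]
          intro hnil
          apply hz
          rw [PySem.Str.len_eq]
          simpa using congrArg List.length hnil

-- ===== VERDICT (by name: the statement is the Claim_ definition above) =====
theorem find_matched_keywords_spec : Claim_equal_find_matched_keywords := by
  intro content keywords _
  unfold Spec_find_matched_keywords find_matched_keywords find_matched_keywords_alt
  have horder : ∀ p ∈ (keywords.foldl pvStepB ([], PySem.Set.empty)).1, p.1.toList ≠ [] :=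
    pv_lows_nonempty keywords [] PySem.Set.empty (by simp)
  have hfilter : ((keywords.foldl pvStepB ([], PySem.Set.empty)).1.filter
        (fun p => PySem.Set.contains
          ((((keywords.foldl pvStepB ([], PySem.Set.empty)).1.filter
              (fun p => PySem.Str.len p.1 ≤ PySem.Str.len (PySem.Str.lower content))).foldl
              (fun s p => PySem.Set.add s (PySem.Str.len p.1)) PySem.Set.empty).foldl
            (fun s L => (PySem.List.pyRange 0 (PySem.Str.len (PySem.Str.lower content) - L + 1) 1).foldl
              (fun s i => PySem.Set.add s
                (PySem.Str.slice (PySem.Str.lower content) (some i) (some (i + L)))) s)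
            PySem.Set.empty) p.1))
      = ((keywords.foldl pvStepB ([], PySem.Set.empty)).1.filter
          (fun p => PySem.Str.isIn p.1 (PySem.Str.lower content))) :=
    List.filter_congr (fun p hp =>
      pv_subs_iff (PySem.Str.lower content) _ p.1 ⟨p, hp, rfl⟩)
  show (if PySem.Str.len content = 0 then []
      else (keywords.foldl (pvStepA (PySem.Str.lower content)) ([], PySem.Set.empty)).1)
    = ((keywords.foldl pvStepB ([], PySem.Set.empty)).1.filter
        (fun p => PySem.Set.contains
          ((((keywords.foldl pvStepB ([], PySem.Set.empty)).1.filter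
              (fun p => PySem.Str.len p.1 ≤ PySem.Str.len (PySem.Str.lower content))).foldl
              (fun s p => PySem.Set.add s (PySem.Str.len p.1)) PySem.Set.empty).foldl
            (fun s L => (PySem.List.pyRange 0 (PySem.Str.len (PySem.Str.lower content) - L + 1) 1).foldl
              (fun s i => PySem.Set.add s
                (PySem.Str.slice (PySem.Str.lower content) (some i) (some (i + L)))) s)
            PySem.Set.empty) p.1)).map (fun p => p.2)
  rw [hfilter]
  by_cases hc : PySem.Str.len content = 0
  · rw [if_pos hc]
    have hcl : (PySem.Str.lower content).toList = [] := by
      rw [PySem.Str.toList_lower, PySem.Chars.lower]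
      have : content.toList = [] := by
        rw [PySem.Str.len_eq] at hc
        exact List.length_eq_zero_iff.mp (by exact_mod_cast hc)
      simp [this]
    symm
    rw [List.map_eq_nil_iff, List.filter_eq_nil_iff]
    intro p hp hfalse
    have := (PySem.Str.isIn_iff_infix p.1 (PySem.Str.lower content)).mp hfalse
    rw [hcl] at this
    exact horder p hp (List.eq_nil_of_infix_nil this)
  · rw [if_neg hc]
    exact pv_loop_inv (PySem.Str.lower content) keywords [] PySem.Set.empty [] PySem.Set.empty
      rfl (fun k => rfl)
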